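-- pv_equiv track=rewrite | github.com/chandrasekharreddy-7/python | LAB/lab1/Q7.py | minop
-- ===== SOURCE A (Python) =====
-- def minop(str1, str2):
--     len1 = len(str1)
--     len2 = len(str2)
--     count = 0
--     if len1 >= len2:
--         for i in str1:
--             if i not in str2:
--                 count += 1
--     else:
--         for i in str2:
--             if i not in str1:
--                 count += 1
--     return f"total no of minimum edit operations = {count}"
-- ===== SOURCE B (Python) =====
-- def minop(str1, str2):
--     if len(str1) >= len(str2):
--         longer, shorter = str1, str2
--     else:
--         longer, shorter = str2, str1
--     present = 0
--     for ch in set(shorter):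
--         present += longer.count(ch)
--     count = len(longer) - present
--     return f"total no of minimum edit operations = {count}"
-- ===== Notes on version B (the rewrite author's own statement) =====
-- stated objective: alternative
-- what changed: B counts by complement: instead of scanning the longer string and testing each character's membership in the shorter one, it iterates over the distinct characters of the SHORTER string, sums their occurrence counts in the longer string via str.count, and subtracts that total from len(longer).
import Mathlib
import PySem

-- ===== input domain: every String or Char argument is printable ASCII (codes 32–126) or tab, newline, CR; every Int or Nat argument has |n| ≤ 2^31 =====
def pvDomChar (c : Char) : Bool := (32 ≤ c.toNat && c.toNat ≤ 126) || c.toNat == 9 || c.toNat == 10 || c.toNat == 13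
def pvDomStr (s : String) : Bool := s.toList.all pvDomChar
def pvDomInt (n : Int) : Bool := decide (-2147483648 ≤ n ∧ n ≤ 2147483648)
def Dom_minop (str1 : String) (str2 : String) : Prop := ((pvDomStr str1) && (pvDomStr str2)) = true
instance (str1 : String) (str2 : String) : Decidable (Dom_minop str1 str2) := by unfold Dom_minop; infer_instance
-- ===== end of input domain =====

-- B counts by complement: it sums, over the distinct characters of the SHORTER string, their
-- occurrence counts in the longer string, and subtracts that from len(longer) (alternative
-- decomposition, same result).

-- ===== PORT A =====
def minop (str1 : String) (str2 : String) : String :=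
  let len1 := PySem.Str.len str1
  let len2 := PySem.Str.len str2
  let count : Int :=
    if len1 ≥ len2 then
      str1.toList.foldl (fun count i =>
        if PySem.Chars.isIn [i] str2.toList then count else count + 1) 0
    else
      str2.toList.foldl (fun count i =>
        if PySem.Chars.isIn [i] str1.toList then count else count + 1) 0
  "total no of minimum edit operations = " ++ PySem.Int.toStr count

-- ===== PORT B =====
def minop_alt (str1 : String) (str2 : String) : String :=
  let p := if PySem.Str.len str1 ≥ PySem.Str.len str2 then (str1, str2) else (str2, str1)
  let present : Int :=
    (PySem.Set.ofList p.2.toList).foldl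
      (fun acc ch => acc + (PySem.Chars.count p.1.toList [ch] : Int)) 0
  let count : Int := PySem.Str.len p.1 - present
  "total no of minimum edit operations = " ++ PySem.Int.toStr count

-- ===== PRECONDITION & SPEC =====
def Spec_minop (str1 : String) (str2 : String) (out : String) : Prop := out = minop_alt str1 str2
instance (str1 : String) (str2 : String) (out : String) : Decidable (Spec_minop str1 str2 out) := by unfold Spec_minop; infer_instance

-- ===== CLAIM (what is proved, stated in full; the proofs are below) =====
def Claim_equal_minop : Prop := ∀ (str1 : String) (str2 : String), Dom_minop str1 str2 → Spec_minop str1 str2 (minop str1 str2)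

-- ===== LEMMAS AND PROOFS =====

-- Python str.count with a single-character needle is plain character count
theorem count_go_singleton (c : Char) (l : List Char) (fuel acc : Nat)
    (h : l.length ≤ fuel) :
    PySem.Chars.count.go [c] fuel l acc = acc + l.count c := by
  induction l generalizing fuel acc with
  | nil => cases fuel <;> simp [PySem.Chars.count.go]
  | cons a t ih =>
    cases fuel with
    | zero => simp at h
    | succ f =>
      have hf : t.length ≤ f := by simpa using h
      by_cases hac : c = a
      · subst hac
        simp [PySem.Chars.count.go, List.isPrefixOf, ih _ _ hf]
        omega
      · have hne : [c].isPrefixOf (a :: t) = false := by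
          simp only [List.isPrefixOf, Bool.and_eq_false_iff]
          left; simpa using hac
        have hcc : (a == c) = false := by simpa using fun hh => hac hh.symm
        simp [PySem.Chars.count.go, hne, ih _ _ hf, List.count_cons, hcc]

theorem count_singleton (c : Char) (l : List Char) :
    PySem.Chars.count l [c] = l.count c := by
  simpa using count_go_singleton c l l.length 0 le_rfl

-- '[c] in s' is plain character membership
theorem isIn_singleton (c : Char) (s : List Char) :
    PySem.Chars.isIn [c] s = s.contains c := by
  rcases h : PySem.Chars.isIn [c] s with _ | _
  · rw [PySem.Chars.isIn_eq_false_iff] at h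
    symm; simp only [List.contains_eq_mem, decide_eq_false_iff_not]
    intro hm
    obtain ⟨u, v, rfl⟩ := List.append_of_mem hm
    exact h ⟨u, v, by simp⟩
  · rw [PySem.Chars.isIn_iff_infix] at h
    symm; simp only [List.contains_eq_mem, decide_eq_true_eq]
    exact h.sublist.subset (List.mem_singleton_self c)

theorem countP_or_disjoint {α : Type} (l : List α) (p1 p2 : α → Bool)
    (h : ∀ x ∈ l, ¬(p1 x = true ∧ p2 x = true)) :
    l.countP (fun x => p1 x || p2 x) = l.countP p1 + l.countP p2 := by
  induction l with
  | nil => simp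
  | cons a t ih =>
    have ha := h a (by simp)
    have ht : ∀ x ∈ t, ¬(p1 x = true ∧ p2 x = true) := fun x hx => h x (by simp [hx])
    simp only [List.countP_cons, ih ht]
    cases hp1 : p1 a <;> cases hp2 : p2 a <;> simp_all <;> omega

-- summing multiplicities over a nodup list of keys counts the members
theorem sum_counts_eq_countP (l : List Char) (u : List Char) (hu : u.Nodup) :
    (u.map (fun k => (l.count k : Int))).sum = (l.countP (fun x => u.contains x) : Int) := by
  induction u with
  | nil => simp
  | cons a t ih =>
    have hnd : t.Nodup := hu.of_cons
    have hna : a ∉ t := (List.nodup_cons.mp hu).1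
    have hsplit : l.countP (fun x => (a :: t).contains x)
        = l.countP (fun x => x == a) + l.countP (fun x => t.contains x) := by
      have : (fun x => (a :: t).contains x)
          = fun x => (x == a) || t.contains x := by
        funext x; simp [Bool.beq_eq_decide_eq]
      rw [this]
      apply countP_or_disjoint
      intro x _ ⟨h1, h2⟩
      have hxa : x = a := by simpa using h1
      have hxt : x ∈ t := by simpa using h2
      exact hna (hxa ▸ hxt)
    rw [List.map_cons, List.sum_cons, ih hnd, hsplit, List.count_eq_countP]
    push_cast; ring

-- complement counting: length minus present equals the missing count
theorem branch_eq (lg sh : List Char) :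
    ((lg.length : Int) -
        (PySem.Set.ofList sh).foldl
          (fun acc ch => acc + (PySem.Chars.count lg [ch] : Int)) 0)
      = lg.foldl (fun count i => if PySem.Chars.isIn [i] sh then count else count + 1) 0 := by
  -- A side: plain filtered count
  have hA : lg.foldl (fun count i => if PySem.Chars.isIn [i] sh then count else count + 1) 0
      = (lg.countP (fun i => !sh.contains i) : Int) := by
    have hfg : (fun (acc : Int) i => if PySem.Chars.isIn [i] sh then acc else acc + 1)
        = (fun (acc : Int) i => if (!sh.contains i) = true then acc + 1 else acc) := by
      funext acc i; rw [isIn_singleton]; cases sh.contains i <;> simp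
    rw [hfg, PySem.List.foldl_if_add_one]
    simp
  -- B side: sum of per-distinct-character counts
  have hcnt : (fun (acc : Int) (ch : Char) => acc + (PySem.Chars.count lg [ch] : Int))
      = fun (acc : Int) (ch : Char) => acc + (lg.count ch : Int) := by
    funext acc ch; rw [count_singleton]
  rw [hA, hcnt, PySem.List.foldl_add (g := fun k => (lg.count k : Int))]
  have hset : (PySem.Set.ofList sh : List Char).Nodup := PySem.Set.nodup_ofList sh
  rw [sum_counts_eq_countP lg _ hset]
  have hmem : (fun x => List.contains (PySem.Set.ofList sh) x) = fun x => sh.contains x := by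
    funext x; simp [List.contains_eq_mem, PySem.Set.mem_ofList]
  rw [hmem]
  have htot : lg.countP (fun x => sh.contains x) + lg.countP (fun x => !sh.contains x)
      = lg.length := by
    rw [List.length_eq_countP_add_countP (fun x => sh.contains x)]
    congr 1
    apply List.countP_congr
    intro x _; cases sh.contains x <;> simp
  omega

-- ===== VERDICT (by name: the statement is the Claim_ definition above) =====
theorem minop_spec : Claim_equal_minop := by
  intro str1 str2 _
  unfold Spec_minop minop minop_alt
  by_cases h : PySem.Str.len str1 ≥ PySem.Str.len str2
  · simp only [h, if_pos]
    rw [← branch_eq str1.toList str2.toList]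
    simp [PySem.Str.len]
  · simp only [h, if_false]
    rw [← branch_eq str2.toList str1.toList]
    simp [PySem.Str.len]
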